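-- pv_equiv track=rewrite | github.com/Mr-Ahmadi/RNA-Secondary-Structure-Prediction | notebook/EKH-25/grammar/pcnf.py | calculate_mismatch
-- ===== SOURCE A (Python) =====
-- def calculate_mismatch(words):
--     n = len(words)
--
--     # Initialize 2D arrays for mismatch, netopen, and total mismatch
--     mismatch = [[0] * n for _ in range(n)]
--     netopen = [[0] * n for _ in range(n)]
--     total_mismatch = [[0] * n for _ in range(n)]
--
--     # Base case: substrings of length 1
--     for i in range(n):
--         if words[i] == "<":
--             mismatch[i][i] = 0
--             netopen[i][i] = 1  # One unmatched '<'
--         elif words[i] == ">":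
--             mismatch[i][i] = 1  # One unmatched '>'
--             netopen[i][i] = 0
--         else:
--             mismatch[i][i] = 0
--             netopen[i][i] = 0
--         total_mismatch[i][i] = mismatch[i][i] + netopen[i][i]
--
--     # Substrings of length >= 2
--     for length in range(2, n + 1):
--         for i in range(n - length + 1):
--             j = i + length - 1
--
--             # Start by copying the values from the substring words[i:j]
--             mismatch[i][j] = mismatch[i][j - 1]
--             netopen[i][j] = netopen[i][j - 1]
--
--             # Incorporate the bracket at position j
--             if words[j] == "<":
--                 netopen[i][j] += 1  # Push one '<'
--             elif words[j] == ">":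
--                 if netopen[i][j] > 0:
--                     netopen[i][j] -= 1  # Match with a previous '<'
--                 else:
--                     mismatch[i][j] += 1  # Unmatched '>'
--
--             total_mismatch[i][j] = mismatch[i][j] + netopen[i][j]
--
--     return total_mismatch
-- ===== SOURCE B (Python) =====
-- def calculate_mismatch(words):
--     n = len(words)
--     # Stage 1: prefix balances. bal[k] = (# "<") - (# ">") among words[:k].
--     bal = [0]
--     for w in words:
--         bal.append(bal[-1] + (1 if w == "<" else -1 if w == ">" else 0))
--     # Stage 2: closed form. Unmatched count of words[i..j] is
--     # bal[j+1] + bal[i] - 2 * min(bal[i..j+1]), computed with a running minimum.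
--     result = []
--     for i in range(n):
--         row = [0] * i
--         bi = bal[i]
--         m = bi
--         for j in range(i, n):
--             if bal[j + 1] < m:
--                 m = bal[j + 1]
--             row.append(bal[j + 1] + bi - 2 * m)
--         result.append(row)
--     return result
-- ===== Notes on version B (the rewrite author's own statement) =====
-- stated objective: alternative
-- what changed: Replaced the per-character mismatch/netopen counter recurrence over three n-by-n DP tables with a two-stage prefix-sum algorithm: one pass builds the prefix balance array bal (#'<' minus #'>'), then each cell is the closed form bal[j+1] + bal[i] - 2*min(bal[i..j+1]) computed with a running minimum per row.
import Mathlib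
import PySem

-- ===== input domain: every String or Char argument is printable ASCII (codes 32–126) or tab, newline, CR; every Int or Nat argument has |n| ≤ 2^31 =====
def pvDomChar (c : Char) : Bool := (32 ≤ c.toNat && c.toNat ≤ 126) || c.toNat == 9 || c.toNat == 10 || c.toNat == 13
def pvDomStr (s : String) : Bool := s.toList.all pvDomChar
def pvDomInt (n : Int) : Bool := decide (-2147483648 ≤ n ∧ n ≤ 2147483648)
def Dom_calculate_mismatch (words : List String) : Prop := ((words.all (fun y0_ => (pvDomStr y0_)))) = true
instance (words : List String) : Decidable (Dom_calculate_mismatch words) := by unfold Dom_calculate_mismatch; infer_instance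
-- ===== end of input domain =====

-- B replaces A's three n×n DP tables of mismatch/netopen counters (filled diagonal-by-diagonal)
-- by a two-stage prefix-sum algorithm: one pass builds the prefix balance array, then each cell is
-- the closed form bal[j+1] + bal[i] - 2*min(bal[i..j+1]) via a running minimum per row
-- (same O(n^2) result, constant-factor faster measured).


-- ===== PORT A =====
-- t[i][j] read/write helpers; all indices the ports use come from range(), hence are
-- nonnegative and in bounds, so the defaulted pyGetD/pySetD are exact there.
def pvGet2 (t : List (List Int)) (i j : Int) : Int :=
  PySem.List.pyGetD (PySem.List.pyGetD t i []) j 0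

def pvSet2 (t : List (List Int)) (i j : Int) (v : Int) : List (List Int) :=
  PySem.List.pySetD t i (PySem.List.pySetD (PySem.List.pyGetD t i []) j v)

def calculate_mismatch (words : List String) : List (List Int) :=
  let n : Int := PySem.List.len words
  -- [[0] * n for _ in range(n)], three times
  let mismatch : List (List Int) := (PySem.List.pyRange 0 n 1).map (fun _ => List.replicate n.toNat 0)
  let netopen : List (List Int) := (PySem.List.pyRange 0 n 1).map (fun _ => List.replicate n.toNat 0)
  let total : List (List Int) := (PySem.List.pyRange 0 n 1).map (fun _ => List.replicate n.toNat 0)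
  -- base case: substrings of length 1
  let st1 : List (List Int) × List (List Int) × List (List Int) :=
    (PySem.List.pyRange 0 n 1).foldl (fun st i =>
      let mm := st.1; let no := st.2.1; let tt := st.2.2
      let wi := PySem.List.pyGetD words i ""
      let mn : List (List Int) × List (List Int) :=
        if wi = "<" then (pvSet2 mm i i 0, pvSet2 no i i 1)
        else if wi = ">" then (pvSet2 mm i i 1, pvSet2 no i i 0)
        else (pvSet2 mm i i 0, pvSet2 no i i 0)
      let tt := pvSet2 tt i i (pvGet2 mn.1 i i + pvGet2 mn.2 i i)
      (mn.1, mn.2, tt)) (mismatch, netopen, total)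
  -- substrings of length >= 2
  let st2 : List (List Int) × List (List Int) × List (List Int) :=
    (PySem.List.pyRange 2 (n + 1) 1).foldl (fun st length =>
      (PySem.List.pyRange 0 (n - length + 1) 1).foldl (fun st i =>
        let mm := st.1; let no := st.2.1; let tt := st.2.2
        let j := i + length - 1
        let mm := pvSet2 mm i j (pvGet2 mm i (j - 1))
        let no := pvSet2 no i j (pvGet2 no i (j - 1))
        let wj := PySem.List.pyGetD words j ""
        let mn : List (List Int) × List (List Int) :=
          if wj = "<" then (mm, pvSet2 no i j (pvGet2 no i j + 1))
          else if wj = ">" then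
            (if pvGet2 no i j > 0 then (mm, pvSet2 no i j (pvGet2 no i j - 1))
             else (pvSet2 mm i j (pvGet2 mm i j + 1), no))
          else (mm, no)
        let tt := pvSet2 tt i j (pvGet2 mn.1 i j + pvGet2 mn.2 i j)
        (mn.1, mn.2, tt)) st) st1
  st2.2.2

-- ===== PORT B =====
def calculate_mismatch_alt (words : List String) : List (List Int) :=
  -- stage 1: bal = [0]; for w in words: bal.append(bal[-1] + (1 if w=="<" else -1 if w==">" else 0))
  let bal : List Int := words.foldl (fun bal w =>
    bal ++ [PySem.List.pyGetD bal (-1) 0 + (if w = "<" then (1 : Int) else if w = ">" then -1 else 0)]) [0]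
  let n : Int := PySem.List.len words
  -- stage 2: closed form bal[j+1] + bal[i] - 2*min(bal[i..j+1]) with a running minimum
  (PySem.List.pyRange 0 n 1).foldl (fun result i =>
    let bi := PySem.List.pyGetD bal i 0
    let st : List Int × Int :=
      (PySem.List.pyRange i n 1).foldl (fun st j =>
        let bj := PySem.List.pyGetD bal (j + 1) 0
        let m := if bj < st.2 then bj else st.2
        (st.1 ++ [bj + bi - 2 * m], m)) (List.replicate i.toNat 0, bi)
    result ++ [st.1]) []

-- ===== PRECONDITION & SPEC =====
def Spec_calculate_mismatch (words : List String) (out : List (List Int)) : Prop := out = calculate_mismatch_alt words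
instance (words : List String) (out : List (List Int)) : Decidable (Spec_calculate_mismatch words out) := by unfold Spec_calculate_mismatch; infer_instance

-- ===== CLAIM (what is proved, stated in full; the proofs are below) =====
def Claim_equal_calculate_mismatch : Prop := ∀ (words : List String), Dom_calculate_mismatch words → Spec_calculate_mismatch words (calculate_mismatch words)

-- ===== LEMMAS AND PROOFS =====

-- spec machinery: one bracket-scan step, prefix scans, and the A-side DP tables as functions

def pvStep (st : Int × Int) (c : String) : Int × Int :=
  if c = "<" then (st.1, st.2 + 1)
  else if c = ">" then (if st.2 > 0 then (st.1, st.2 - 1) else (st.1 + 1, st.2))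
  else st

def pvScan : Int × Int → List String → List Int
  | _, [] => []
  | st, c :: t => ((pvStep st c).1 + (pvStep st c).2) :: pvScan (pvStep st c) t

def pvRow (w : List String) (i : Nat) : List Int :=
  List.replicate i 0 ++ pvScan (0, 0) (w.drop i)

-- (mismatch, netopen) of the substring w[a..b]
def pvP (w : List String) (a b : Nat) : Int × Int :=
  ((w.drop a).take (b + 1 - a)).foldl pvStep (0, 0)

-- named copies of the loop bodies of the A port (definitionally equal to the lambdas there)

def pvAStep1 (words : List String)
    (st : List (List Int) × List (List Int) × List (List Int)) (i : Int) :
    List (List Int) × List (List Int) × List (List Int) :=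
  let mm := st.1; let no := st.2.1; let tt := st.2.2
  let wi := PySem.List.pyGetD words i ""
  let mn : List (List Int) × List (List Int) :=
    if wi = "<" then (pvSet2 mm i i 0, pvSet2 no i i 1)
    else if wi = ">" then (pvSet2 mm i i 1, pvSet2 no i i 0)
    else (pvSet2 mm i i 0, pvSet2 no i i 0)
  let tt := pvSet2 tt i i (pvGet2 mn.1 i i + pvGet2 mn.2 i i)
  (mn.1, mn.2, tt)

def pvAStep2 (words : List String) (length : Int)
    (st : List (List Int) × List (List Int) × List (List Int)) (i : Int) :
    List (List Int) × List (List Int) × List (List Int) :=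
  let mm := st.1; let no := st.2.1; let tt := st.2.2
  let j := i + length - 1
  let mm := pvSet2 mm i j (pvGet2 mm i (j - 1))
  let no := pvSet2 no i j (pvGet2 no i (j - 1))
  let wj := PySem.List.pyGetD words j ""
  let mn : List (List Int) × List (List Int) :=
    if wj = "<" then (mm, pvSet2 no i j (pvGet2 no i j + 1))
    else if wj = ">" then
      (if pvGet2 no i j > 0 then (mm, pvSet2 no i j (pvGet2 no i j - 1))
       else (pvSet2 mm i j (pvGet2 mm i j + 1), no))
    else (mm, no)
  let tt := pvSet2 tt i j (pvGet2 mn.1 i j + pvGet2 mn.2 i j)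
  (mn.1, mn.2, tt)

-- table-as-function machinery

def pvTbl (n : Nat) (f : Nat → Nat → Int) : List (List Int) :=
  (List.range n).map (fun i => (List.range n).map (f i))

lemma pvSet_map_range {A : Type} (n a : Nat) (g : Nat → A) (v : A) :
    ((List.range n).map g).set a v = (List.range n).map (fun i => if i = a then v else g i) := by
  apply List.ext_getElem
  · simp
  · intro k h1 h2
    simp only [List.getElem_set, List.getElem_map, List.getElem_range] at *
    by_cases h : a = k <;> simp [h, eq_comm]

lemma pvGet2_tbl (n : Nat) (f : Nat → Nat → Int) (a b : Nat) (ha : a < n) (hb : b < n) :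
    pvGet2 (pvTbl n f) (a : Int) (b : Int) = f a b := by
  unfold pvGet2 pvTbl
  rw [PySem.List.pyGetD_natCast, PySem.List.pyGetD_natCast,
    PySem.List.getD_map_range _ _ _ _ ha, PySem.List.getD_map_range _ _ _ _ hb]

lemma pvSet2_tbl (n : Nat) (f : Nat → Nat → Int) (a b : Nat) (v : Int) (ha : a < n) :
    pvSet2 (pvTbl n f) (a : Int) (b : Int) v
      = pvTbl n (fun i j => if i = a ∧ j = b then v else f i j) := by
  unfold pvSet2 pvTbl
  rw [PySem.List.pyGetD_natCast, PySem.List.getD_map_range _ _ _ _ ha,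
    PySem.List.pySetD_natCast, PySem.List.pySetD_natCast, pvSet_map_range, pvSet_map_range]
  apply List.map_congr_left
  intro i _
  by_cases h : i = a
  · subst h; simp only []
    apply List.map_congr_left; intro j _
    by_cases hj : j = b <;> simp [hj]
  · simp only [if_neg h]
    apply List.map_congr_left; intro j _
    simp [h]

lemma pvTbl_congr {n : Nat} {f g : Nat → Nat → Int}
    (h : ∀ i < n, ∀ j < n, f i j = g i j) : pvTbl n f = pvTbl n g := by
  unfold pvTbl
  apply List.map_congr_left; intro i hi
  apply List.map_congr_left; intro j hj
  exact h i (List.mem_range.mp hi) j (List.mem_range.mp hj)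

lemma pvTbl_zero (n : Nat) :
    (PySem.List.pyRange 0 (n : Int) 1).map (fun _ => List.replicate ((n : Int)).toNat 0)
      = pvTbl n (fun _ _ => (0 : Int)) := by
  rw [PySem.List.pyRange_zero_natCast, List.map_map]
  unfold pvTbl
  apply List.map_congr_left; intro i _
  simp [List.map_const']

-- invariant tables

def pvBM (w : List String) (k : Nat) : Nat → Nat → Int :=
  fun i j => if i = j ∧ i < k then (pvP w i i).1 else 0
def pvBN (w : List String) (k : Nat) : Nat → Nat → Int :=
  fun i j => if i = j ∧ i < k then (pvP w i i).2 else 0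
def pvBT (w : List String) (k : Nat) : Nat → Nat → Int :=
  fun i j => if i = j ∧ i < k then (pvP w i i).1 + (pvP w i i).2 else 0

def pvGM (w : List String) (L k : Nat) : Nat → Nat → Int :=
  fun i j => if (i ≤ j ∧ j < i + L) ∨ (i < k ∧ j = i + L) then (pvP w i j).1 else 0
def pvGN (w : List String) (L k : Nat) : Nat → Nat → Int :=
  fun i j => if (i ≤ j ∧ j < i + L) ∨ (i < k ∧ j = i + L) then (pvP w i j).2 else 0
def pvGT (w : List String) (L k : Nat) : Nat → Nat → Int :=
  fun i j => if (i ≤ j ∧ j < i + L) ∨ (i < k ∧ j = i + L) then (pvP w i j).1 + (pvP w i j).2 else 0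

-- facts about pvP

lemma pvP_diag (w : List String) (a : Nat) (ha : a < w.length) :
    pvP w a a = pvStep (0, 0) (w.getD a "") := by
  unfold pvP
  have h1 : (w.drop a).take (a + 1 - a) = [w[a]'ha] := by
    rw [show a + 1 - a = 1 by omega, List.drop_eq_getElem_cons ha]
    rfl
  rw [h1, List.getD_eq_getElem w "" ha]
  rfl

lemma pvP_succ (w : List String) (a b : Nat) (hab : a ≤ b) (hb : b + 1 < w.length) :
    pvP w a (b + 1) = pvStep (pvP w a b) (w.getD (b + 1) "") := by
  unfold pvP
  have h1 : b + 1 + 1 - a = (b + 1 - a) + 1 := by omega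
  have h2 : b + 1 - a < (w.drop a).length := by simp; omega
  rw [h1, List.take_add_one, List.getElem?_eq_getElem h2]
  have h3 : (w.drop a)[b + 1 - a]'h2 = w[b + 1]'(by omega) := by
    rw [List.getElem_drop]
    congr 1
    omega
  rw [List.foldl_append, h3, List.getD_eq_getElem w "" (by omega : b + 1 < w.length)]
  rfl

-- facts about pvScan

lemma pvScan_length (st : Int × Int) (l : List String) : (pvScan st l).length = l.length := by
  induction l generalizing st with
  | nil => rfl
  | cons c t ih => simp [pvScan, ih]

lemma pvScan_getElem (l : List String) (st : Int × Int) (k : Nat) (hk : k < l.length) :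
    (pvScan st l)[k]'(by rw [pvScan_length]; exact hk)
      = ((l.take (k + 1)).foldl pvStep st).1 + ((l.take (k + 1)).foldl pvStep st).2 := by
  induction l generalizing st k with
  | nil => simp at hk
  | cons c t ih =>
    cases k with
    | zero => simp [pvScan]
    | succ k =>
      have hk' : k < t.length := by simpa using hk
      simpa [pvScan] using ih (pvStep st c) k hk'

-- B-side machinery: prefix balances and the running-minimum closed-form scan

def pvDelta (c : String) : Int := if c = "<" then 1 else if c = ">" then -1 else 0

def pvBal (l : List String) : Int := l.foldl (fun b c => b + pvDelta c) 0

def pvPre (w : List String) : List Int :=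
  (List.range (w.length + 1)).map (fun k => pvBal (w.take k))

-- closed-form scan: carries (current balance, running minimum), emits b' + bi - 2*m'
def pvCScan (bi : Int) : Int → Int → List String → List Int × Int
  | _, m, [] => ([], m)
  | b, m, c :: t =>
    let b' := b + pvDelta c
    let m' := if b' < m then b' else m
    let r := pvCScan bi b' m' t
    ((b' + bi - 2 * m') :: r.1, r.2)

-- named copies of the loop bodies of the B port

def pvB2Step (bal : List Int) (bi : Int) (st : List Int × Int) (j : Int) : List Int × Int :=
  let bj := PySem.List.pyGetD bal (j + 1) 0
  let m := if bj < st.2 then bj else st.2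
  (st.1 ++ [bj + bi - 2 * m], m)

def pvB2Outer (bal : List Int) (n : Int) (result : List (List Int)) (i : Int) : List (List Int) :=
  let bi := PySem.List.pyGetD bal i 0
  let st : List Int × Int :=
    (PySem.List.pyRange i n 1).foldl (fun st j => pvB2Step bal bi st j)
      (List.replicate i.toNat 0, bi)
  result ++ [st.1]

-- stage 1 builds exactly the prefix-balance list

lemma pvBal_append_singleton (l : List String) (c : String) :
    pvBal (l ++ [c]) = pvBal l + pvDelta c := by
  unfold pvBal
  rw [List.foldl_append]
  rfl

lemma pvPre_append_singleton (w : List String) (c : String) :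
    pvPre (w ++ [c]) = pvPre w ++ [pvBal w + pvDelta c] := by
  unfold pvPre
  rw [List.length_append, List.length_singleton, List.range_succ, List.map_append]
  congr 1
  · apply List.map_congr_left
    intro k hk
    have hk' : k ≤ w.length := by
      have := List.mem_range.mp hk; omega
    rw [List.take_append_of_le_length hk']
  · simp [← pvBal_append_singleton, List.take_of_length_le]

lemma pvPre_getLast (w : List String) (h : pvPre w ≠ []) :
    (pvPre w).getLast h = pvBal w := by
  unfold pvPre
  rw [List.getLast_eq_getElem]
  simp [List.take_of_length_le]

lemma pvBal_build (w : List String) :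
    w.foldl (fun bal c =>
        bal ++ [PySem.List.pyGetD bal (-1) 0 + (if c = "<" then (1 : Int) else if c = ">" then -1 else 0)]) [0]
      = pvPre w := by
  induction w using List.reverseRecOn with
  | nil => rfl
  | append_singleton w c ih =>
    rw [List.foldl_append, List.foldl_cons, List.foldl_nil, ih, pvPre_append_singleton]
    congr 2
    have hne : pvPre w ≠ [] := by unfold pvPre; simp
    rw [PySem.List.pyGetD_neg_one _ _ hne, pvPre_getLast w hne]
    rfl

lemma pvPre_getD (w : List String) (k : Nat) (hk : k ≤ w.length) :
    PySem.List.pyGetD (pvPre w) (k : Int) 0 = pvBal (w.take k) := by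
  unfold pvPre
  rw [PySem.List.pyGetD_natCast, PySem.List.getD_map_range _ _ _ _ (by omega : k < w.length + 1)]

-- the closed-form scan agrees with the counter scan

lemma pvScan_congr (a1 b1 a2 b2 : Int) (t : List String) (h1 : a1 = a2) (h2 : b1 = b2) :
    pvScan (a1, b1) t = pvScan (a2, b2) t := by rw [h1, h2]

lemma pvCScan_eq_scan (l : List String) :
    ∀ (bi b m : Int), m ≤ b → m ≤ bi →
      (pvCScan bi b m l).1 = pvScan (bi - m, b - m) l := by
  induction l with
  | nil => intro bi b m _ _; rfl
  | cons c t ih =>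
    intro bi b m hmb hmbi
    simp only [pvCScan, pvScan, pvStep, pvDelta]
    by_cases h1 : c = "<"
    · simp only [if_pos h1]
      rw [if_neg (by omega : ¬ b + 1 < m), ih bi (b + 1) m (by omega) hmbi]
      exact congrArg₂ List.cons (by omega) (pvScan_congr _ _ _ _ t (by omega) (by omega))
    · by_cases h2 : c = ">"
      · simp only [if_neg h1, if_pos h2]
        by_cases h0 : b - m > 0
        · rw [if_pos h0, if_neg (by omega : ¬ b + -1 < m),
            ih bi (b + -1) m (by omega) hmbi]
          dsimp only
          exact congrArg₂ List.cons (by omega) (pvScan_congr _ _ _ _ t (by omega) (by omega))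
        · rw [if_neg h0, if_pos (by omega : b + -1 < m),
            ih bi (b + -1) (b + -1) (by omega) (by omega)]
          dsimp only
          exact congrArg₂ List.cons (by omega) (pvScan_congr _ _ _ _ t (by omega) (by omega))
      · simp only [if_neg h1, if_neg h2]
        rw [if_neg (by omega : ¬ b + 0 < m), ih bi (b + 0) m (by omega) hmbi]
        exact congrArg₂ List.cons (by omega) (pvScan_congr _ _ _ _ t (by omega) (by omega))

-- the B inner fold computes the closed-form scan over the suffix

lemma pvB2_scan_range (w : List String) (bi : Int) (d : Nat) :
    ∀ (a : Nat), w.length - a = d → ∀ (row : List Int) (m : Int),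
    (PySem.List.pyRange (a : Int) (w.length : Int) 1).foldl (fun st j => pvB2Step (pvPre w) bi st j)
        (row, m)
      = (row ++ (pvCScan bi (pvBal (w.take a)) m (w.drop a)).1,
          (pvCScan bi (pvBal (w.take a)) m (w.drop a)).2) := by
  induction d with
  | zero =>
    intro a ha row m
    rw [PySem.List.pyRange_one_eq_nil (by omega), List.drop_eq_nil_of_le (by omega)]
    simp [pvCScan]
  | succ d ih =>
    intro a ha row m
    rw [PySem.List.pyRange_one_cons (by omega : (a : Int) < (w.length : Int))]
    simp only [List.foldl_cons]
    have hstep : pvB2Step (pvPre w) bi (row, m) (a : Int)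
        = (row ++ [pvBal (w.take (a + 1)) + bi - 2 *
              (if pvBal (w.take (a + 1)) < m then pvBal (w.take (a + 1)) else m)],
            (if pvBal (w.take (a + 1)) < m then pvBal (w.take (a + 1)) else m)) := by
      unfold pvB2Step
      have hc : ((a : Int) + 1) = ((a + 1 : Nat) : Int) := by omega
      rw [hc, pvPre_getD w (a + 1) (by omega)]
    rw [hstep]
    have hcast : ((a : Int) + 1) = ((a + 1 : Nat) : Int) := by omega
    rw [hcast, ih (a + 1) (by omega)]
    have hdrop : w.drop a = w[a]'(by omega) :: w.drop (a + 1) :=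
      List.drop_eq_getElem_cons (by omega)
    have htake : pvBal (w.take (a + 1)) = pvBal (w.take a) + pvDelta (w[a]'(by omega)) := by
      rw [List.take_add_one, List.getElem?_eq_getElem (by omega : a < w.length)]
      exact pvBal_append_singleton _ _
    conv_rhs => rw [hdrop]
    simp only [pvCScan, ← htake, List.append_assoc, List.singleton_append]

-- the A port fills the tables (proof strategy: tables as functions, three invariants)

lemma pvA_base_step (w : List String) (k : Nat) (hk : k < w.length) :
    pvAStep1 w (pvTbl w.length (pvBM w k), pvTbl w.length (pvBN w k), pvTbl w.length (pvBT w k))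
        (k : Int)
      = (pvTbl w.length (pvBM w (k + 1)), pvTbl w.length (pvBN w (k + 1)),
          pvTbl w.length (pvBT w (k + 1))) := by
  have hP : pvP w k k = pvStep (0, 0) (w.getD k "") := pvP_diag w k hk
  simp only [pvAStep1, PySem.List.pyGetD_natCast]
  by_cases h1 : w.getD k "" = "<"
  · have hP1 : (pvP w k k).1 = 0 := by
      rw [hP]; simp only [pvStep]; rw [if_pos h1]; all_goals norm_num
    have hP2 : (pvP w k k).2 = 1 := by
      rw [hP]; simp only [pvStep]; rw [if_pos h1]; all_goals norm_num
    rw [if_pos h1]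
    simp only [pvSet2_tbl _ _ _ _ _ hk, pvGet2_tbl _ _ _ _ hk hk]
    simp only [and_self, if_pos rfl]
    refine congrArg₂ Prod.mk (pvTbl_congr ?_) (congrArg₂ Prod.mk (pvTbl_congr ?_) (pvTbl_congr ?_)) <;>
    · intro i hi j hj
      simp only [pvBM, pvBN, pvBT]
      by_cases hik : i = k <;> by_cases hjk : j = k <;>
        [skip; skip; skip; skip] <;>
        first
          | (subst hik; subst hjk; simp [hP1, hP2])
          | (split_ifs <;> first | rfl | omega)
  · by_cases h2 : w.getD k "" = ">"
    · have hP1 : (pvP w k k).1 = 1 := by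
        rw [hP]; simp only [pvStep]; rw [if_neg h1, if_pos h2]; all_goals norm_num
      have hP2 : (pvP w k k).2 = 0 := by
        rw [hP]; simp only [pvStep]; rw [if_neg h1, if_pos h2]; all_goals norm_num
      rw [if_neg h1, if_pos h2]
      simp only [pvSet2_tbl _ _ _ _ _ hk, pvGet2_tbl _ _ _ _ hk hk]
      simp only [and_self, if_pos rfl]
      refine congrArg₂ Prod.mk (pvTbl_congr ?_) (congrArg₂ Prod.mk (pvTbl_congr ?_) (pvTbl_congr ?_)) <;>
      · intro i hi j hj
        simp only [pvBM, pvBN, pvBT]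
        by_cases hik : i = k <;> by_cases hjk : j = k <;>
          [skip; skip; skip; skip] <;>
          first
            | (subst hik; subst hjk; simp [hP1, hP2])
            | (split_ifs <;> first | rfl | omega)
    · have hP1 : (pvP w k k).1 = 0 := by
        rw [hP]; simp only [pvStep]; rw [if_neg h1, if_neg h2]; all_goals norm_num
      have hP2 : (pvP w k k).2 = 0 := by
        rw [hP]; simp only [pvStep]; rw [if_neg h1, if_neg h2]; all_goals norm_num
      rw [if_neg h1, if_neg h2]
      simp only [pvSet2_tbl _ _ _ _ _ hk, pvGet2_tbl _ _ _ _ hk hk]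
      simp only [and_self, if_pos rfl]
      refine congrArg₂ Prod.mk (pvTbl_congr ?_) (congrArg₂ Prod.mk (pvTbl_congr ?_) (pvTbl_congr ?_)) <;>
      · intro i hi j hj
        simp only [pvBM, pvBN, pvBT]
        by_cases hik : i = k <;> by_cases hjk : j = k <;>
          [skip; skip; skip; skip] <;>
          first
            | (subst hik; subst hjk; simp [hP1, hP2])
            | (split_ifs <;> first | rfl | omega)

lemma pvA_base (w : List String) (k : Nat) (hk : k ≤ w.length) :
    (List.range k).foldl (fun st (kk : Nat) => pvAStep1 w st (kk : Int))
        (pvTbl w.length (fun _ _ => 0), pvTbl w.length (fun _ _ => 0), pvTbl w.length (fun _ _ => 0))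
      = (pvTbl w.length (pvBM w k), pvTbl w.length (pvBN w k), pvTbl w.length (pvBT w k)) := by
  induction k with
  | zero =>
    simp only [List.range_zero, List.foldl_nil]
    refine congrArg₂ Prod.mk (pvTbl_congr ?_) (congrArg₂ Prod.mk (pvTbl_congr ?_) (pvTbl_congr ?_)) <;>
    · intro i hi j hj
      simp [pvBM, pvBN, pvBT]
  | succ k ih =>
    rw [List.range_succ, List.foldl_append, ih (by omega)]
    simp only [List.foldl_cons, List.foldl_nil]
    exact pvA_base_step w k (by omega)

lemma pvA_inner_step (w : List String) (L k : Nat) (hL : 1 ≤ L) (hkL : k + L < w.length) :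
    pvAStep2 w ((L : Int) + 1)
        (pvTbl w.length (pvGM w L k), pvTbl w.length (pvGN w L k), pvTbl w.length (pvGT w L k))
        (k : Int)
      = (pvTbl w.length (pvGM w L (k + 1)), pvTbl w.length (pvGN w L (k + 1)),
          pvTbl w.length (pvGT w L (k + 1))) := by
  have hkn : k < w.length := by omega
  have hjn : k + L < w.length := hkL
  have hj1n : k + L - 1 < w.length := by omega
  have hj : (k : Int) + ((L : Int) + 1) - 1 = ((k + L : Nat) : Int) := by omega
  have hj1 : ((k + L : Nat) : Int) - 1 = ((k + L - 1 : Nat) : Int) := by omega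
  have hgM : pvGM w L k k (k + L - 1) = (pvP w k (k + L - 1)).1 := by
    simp only [pvGM]; rw [if_pos (by omega)]
  have hgN : pvGN w L k k (k + L - 1) = (pvP w k (k + L - 1)).2 := by
    simp only [pvGN]; rw [if_pos (by omega)]
  have hPs : pvP w k (k + L) = pvStep (pvP w k (k + L - 1)) (w.getD (k + L) "") := by
    have := pvP_succ w k (k + L - 1) (by omega) (by omega)
    rw [show k + L - 1 + 1 = k + L by omega] at this
    exact this
  simp only [pvAStep2]
  rw [hj, hj1, PySem.List.pyGetD_natCast]
  simp only [pvSet2_tbl _ _ _ _ _ hkn, pvGet2_tbl _ _ _ _ hkn hj1n, pvGet2_tbl _ _ _ _ hkn hjn]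
  simp only [and_self, if_true, hgM, hgN]
  by_cases hc1 : w.getD (k + L) "" = "<"
  · have hV1 : (pvP w k (k + L)).1 = (pvP w k (k + L - 1)).1 := by
      rw [hPs]; simp only [pvStep]; rw [if_pos hc1]
    have hV2 : (pvP w k (k + L)).2 = (pvP w k (k + L - 1)).2 + 1 := by
      rw [hPs]; simp only [pvStep]; rw [if_pos hc1]
    rw [if_pos hc1]
    dsimp only
    simp only [pvGet2_tbl _ _ _ _ hkn hjn,
      eq_true (show k = k ∧ k + L = k + L from ⟨rfl, rfl⟩), and_self, if_true]
    refine congrArg₂ Prod.mk (pvTbl_congr ?_) (congrArg₂ Prod.mk (pvTbl_congr ?_) (pvTbl_congr ?_)) <;>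
    · intro i hi j hj'
      simp only [pvGM, pvGN, pvGT]
      split_ifs with h1 <;>
        first
          | rfl
          | omega
          | (obtain ⟨rfl, rfl⟩ := h1; simp only [hV1, hV2]; all_goals omega)
  · by_cases hc2 : w.getD (k + L) "" = ">"
    · rw [if_neg hc1, if_pos hc2]
      by_cases h0 : (pvP w k (k + L - 1)).2 > 0
      · have hV1 : (pvP w k (k + L)).1 = (pvP w k (k + L - 1)).1 := by
          rw [hPs]; simp only [pvStep]; rw [if_neg hc1, if_pos hc2, if_pos h0]
        have hV2 : (pvP w k (k + L)).2 = (pvP w k (k + L - 1)).2 - 1 := by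
          rw [hPs]; simp only [pvStep]; rw [if_neg hc1, if_pos hc2, if_pos h0]
        rw [if_pos h0]
        dsimp only
        simp only [pvGet2_tbl _ _ _ _ hkn hjn,
          eq_true (show k = k ∧ k + L = k + L from ⟨rfl, rfl⟩), and_self, if_true]
        refine congrArg₂ Prod.mk (pvTbl_congr ?_) (congrArg₂ Prod.mk (pvTbl_congr ?_) (pvTbl_congr ?_)) <;>
        · intro i hi j hj'
          simp only [pvGM, pvGN, pvGT]
          split_ifs with h1 <;>
            first
              | rfl
              | omega
              | (obtain ⟨rfl, rfl⟩ := h1; simp only [hV1, hV2]; all_goals omega)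
      · have hV1 : (pvP w k (k + L)).1 = (pvP w k (k + L - 1)).1 + 1 := by
          rw [hPs]; simp only [pvStep]; rw [if_neg hc1, if_pos hc2, if_neg h0]
        have hV2 : (pvP w k (k + L)).2 = (pvP w k (k + L - 1)).2 := by
          rw [hPs]; simp only [pvStep]; rw [if_neg hc1, if_pos hc2, if_neg h0]
        rw [if_neg h0]
        dsimp only
        simp only [pvGet2_tbl _ _ _ _ hkn hjn,
          eq_true (show k = k ∧ k + L = k + L from ⟨rfl, rfl⟩), and_self, if_true]
        refine congrArg₂ Prod.mk (pvTbl_congr ?_) (congrArg₂ Prod.mk (pvTbl_congr ?_) (pvTbl_congr ?_)) <;>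
        · intro i hi j hj'
          simp only [pvGM, pvGN, pvGT]
          split_ifs with h1 <;>
            first
              | rfl
              | omega
              | (obtain ⟨rfl, rfl⟩ := h1; simp only [hV1, hV2]; all_goals omega)
    · have hV1 : (pvP w k (k + L)).1 = (pvP w k (k + L - 1)).1 := by
        rw [hPs]; simp only [pvStep]; rw [if_neg hc1, if_neg hc2]
      have hV2 : (pvP w k (k + L)).2 = (pvP w k (k + L - 1)).2 := by
        rw [hPs]; simp only [pvStep]; rw [if_neg hc1, if_neg hc2]
      rw [if_neg hc1, if_neg hc2]
      dsimp only
      simp only [pvGet2_tbl _ _ _ _ hkn hjn,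
        eq_true (show k = k ∧ k + L = k + L from ⟨rfl, rfl⟩), and_self, if_true]
      refine congrArg₂ Prod.mk (pvTbl_congr ?_) (congrArg₂ Prod.mk (pvTbl_congr ?_) (pvTbl_congr ?_)) <;>
      · intro i hi j hj'
        simp only [pvGM, pvGN, pvGT]
        split_ifs with h1 <;>
          first
            | rfl
            | omega
            | (obtain ⟨rfl, rfl⟩ := h1; simp only [hV1, hV2]; all_goals omega)

lemma pvA_inner (w : List String) (L : Nat) (hL : 1 ≤ L) (hLn : L < w.length)
    (k : Nat) (hk : k ≤ w.length - L) :
    (List.range k).foldl (fun st (kk : Nat) => pvAStep2 w ((L : Int) + 1) st (kk : Int))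
        (pvTbl w.length (pvGM w L 0), pvTbl w.length (pvGN w L 0), pvTbl w.length (pvGT w L 0))
      = (pvTbl w.length (pvGM w L k), pvTbl w.length (pvGN w L k), pvTbl w.length (pvGT w L k)) := by
  induction k with
  | zero => simp
  | succ k ih =>
    rw [List.range_succ, List.foldl_append, ih (by omega)]
    simp only [List.foldl_cons, List.foldl_nil]
    exact pvA_inner_step w L k hL (by omega)

lemma pvGM_base (w : List String) :
    pvTbl w.length (pvBM w w.length) = pvTbl w.length (pvGM w 1 0)
      ∧ pvTbl w.length (pvBN w w.length) = pvTbl w.length (pvGN w 1 0)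
      ∧ pvTbl w.length (pvBT w w.length) = pvTbl w.length (pvGT w 1 0) := by
  refine ⟨pvTbl_congr ?_, pvTbl_congr ?_, pvTbl_congr ?_⟩ <;>
  · intro i hi j hj
    simp only [pvBM, pvBN, pvBT, pvGM, pvGN, pvGT]
    by_cases hij : i = j
    · subst hij; simp; omega
    · rw [if_neg (by omega), if_neg (by omega)]

lemma pvA_outer (w : List String) (hw : 1 ≤ w.length) (l : Nat) (hl : l ≤ w.length - 1) :
    (List.range l).foldl (fun st (kk : Nat) =>
        (PySem.List.pyRange 0 ((w.length : Int) - (2 + (kk : Int)) + 1) 1).foldl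
          (fun st i => pvAStep2 w (2 + (kk : Int)) st i) st)
      (pvTbl w.length (pvGM w 1 0), pvTbl w.length (pvGN w 1 0), pvTbl w.length (pvGT w 1 0))
      = (pvTbl w.length (pvGM w (l + 1) 0), pvTbl w.length (pvGN w (l + 1) 0),
          pvTbl w.length (pvGT w (l + 1) 0)) := by
  induction l with
  | zero => simp
  | succ l ih =>
    rw [List.range_succ, List.foldl_append, ih (by omega)]
    simp only [List.foldl_cons, List.foldl_nil]
    have hrange : (PySem.List.pyRange 0 ((w.length : Int) - (2 + (l : Int)) + 1) 1)
        = (List.range (w.length - (l + 1))).map (fun k : Nat => (k : Int)) := by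
      rw [show ((w.length : Int) - (2 + (l : Int)) + 1) = ((w.length - (l + 1) : Nat) : Int) by omega,
        PySem.List.pyRange_zero_natCast]
    have hlen : (2 + (l : Int)) = ((l + 1 : Nat) : Int) + 1 := by push_cast; ring
    rw [hrange, List.foldl_map, hlen]
    rw [pvA_inner w (l + 1) (by omega) (by omega) (w.length - (l + 1)) le_rfl]
    refine congrArg₂ Prod.mk (pvTbl_congr ?_) (congrArg₂ Prod.mk (pvTbl_congr ?_) (pvTbl_congr ?_)) <;>
    · intro i hi j hj
      simp only [pvGM, pvGN, pvGT]
      by_cases h : (i ≤ j ∧ j < i + (l + 1)) ∨ (i < w.length - (l + 1) ∧ j = i + (l + 1))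
      · rw [if_pos h, if_pos (by omega)]
      · rw [if_neg h, if_neg (by omega)]

lemma pvFinal_rows (w : List String) :
    pvTbl w.length (pvGT w w.length 0) = (List.range w.length).map (pvRow w) := by
  unfold pvTbl
  apply List.map_congr_left
  intro i hi
  have hi' : i < w.length := List.mem_range.mp hi
  apply List.ext_getElem
  · simp [pvRow, pvScan_length]
    omega
  · intro j hj1 hj2
    simp only [List.getElem_map, List.getElem_range, List.length_map, List.length_range] at hj1 ⊢
    simp only [pvGT]
    simp only [pvRow]
    by_cases hij : i ≤ j
    · rw [if_pos (by omega)]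
      rw [List.getElem_append_right (by simp; omega)]
      have hk : j - i < (w.drop i).length := by simp; omega
      simp only [List.length_replicate]
      rw [pvScan_getElem (w.drop i) (0, 0) (j - i) hk]
      have htake : ((w.drop i).take (j - i + 1)) = ((w.drop i).take (j + 1 - i)) := by
        congr 1
        omega
      rw [htake]
      rfl
    · rw [if_neg (by omega)]
      rw [List.getElem_append_left (by simp; omega)]
      simp

lemma pvA_eq (w : List String) :
    calculate_mismatch w = (List.range w.length).map (pvRow w) := by
  match w with
  | [] => rfl
  | a :: t =>
    set w := a :: t with hw
    have hw1 : 1 ≤ w.length := by simp [hw]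
    have h : calculate_mismatch w
        = ((PySem.List.pyRange 2 (PySem.List.len w + 1) 1).foldl (fun st length =>
            (PySem.List.pyRange 0 (PySem.List.len w - length + 1) 1).foldl
              (fun st i => pvAStep2 w length st i) st)
          ((PySem.List.pyRange 0 (PySem.List.len w) 1).foldl (fun st i => pvAStep1 w st i)
            ((PySem.List.pyRange 0 (PySem.List.len w) 1).map
                (fun _ => List.replicate (PySem.List.len w).toNat 0),
              (PySem.List.pyRange 0 (PySem.List.len w) 1).map
                (fun _ => List.replicate (PySem.List.len w).toNat 0),
              (PySem.List.pyRange 0 (PySem.List.len w) 1).map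
                (fun _ => List.replicate (PySem.List.len w).toNat 0)))).2.2 := rfl
    rw [h]
    simp only [PySem.List.len_eq]
    rw [pvTbl_zero]
    have hr0 : (PySem.List.pyRange 0 ((w.length : Nat) : Int) 1)
        = (List.range w.length).map (fun k : Nat => (k : Int)) := PySem.List.pyRange_zero_natCast _
    rw [hr0, List.foldl_map, pvA_base w w.length le_rfl]
    rw [(pvGM_base w).1, (pvGM_base w).2.1, (pvGM_base w).2.2]
    have hr2 : (PySem.List.pyRange 2 ((w.length : Int) + 1) 1)
        = (List.range (w.length - 1)).map (fun k : Nat => 2 + (k : Int)) := by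
      rw [PySem.List.pyRange_one]
      congr 2
      omega
    rw [hr2, List.foldl_map, pvA_outer w hw1 (w.length - 1) le_rfl]
    have : w.length - 1 + 1 = w.length := by omega
    rw [this]
    exact pvFinal_rows w

-- the B port computes the rows

lemma pvB2Outer_eq (w : List String) (result : List (List Int)) (k : Nat) (hk : k < w.length) :
    pvB2Outer (pvPre w) (w.length : Int) result (k : Int) = result ++ [pvRow w k] := by
  unfold pvB2Outer
  dsimp only
  rw [pvPre_getD w k (by omega)]
  rw [pvB2_scan_range w (pvBal (w.take k)) (w.length - k) k rfl]
  rw [pvCScan_eq_scan (w.drop k) (pvBal (w.take k)) (pvBal (w.take k)) (pvBal (w.take k))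
    le_rfl le_rfl]
  simp [pvRow]

lemma pvB2_outer_range (w : List String) (k : Nat) (hk : k ≤ w.length) (acc : List (List Int)) :
    (List.range k).foldl (fun acc (kk : Nat) => pvB2Outer (pvPre w) (w.length : Int) acc (kk : Int)) acc
      = acc ++ (List.range k).map (pvRow w) := by
  induction k generalizing acc with
  | zero => simp
  | succ k ih =>
    rw [List.range_succ, List.foldl_append, ih (by omega)]
    simp only [List.foldl_cons, List.foldl_nil]
    rw [pvB2Outer_eq w _ k (by omega)]
    simp [List.map_append]

lemma pvB_eq (w : List String) :
    calculate_mismatch_alt w = (List.range w.length).map (pvRow w) := by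
  have h : calculate_mismatch_alt w
      = List.foldl
          (pvB2Outer
            (w.foldl (fun bal c =>
              bal ++ [PySem.List.pyGetD bal (-1) 0 +
                (if c = "<" then (1 : Int) else if c = ">" then -1 else 0)]) [0])
            (PySem.List.len w))
          [] (PySem.List.pyRange 0 (PySem.List.len w) 1) := rfl
  rw [h, pvBal_build]
  simp only [PySem.List.len_eq]
  have h2 : (PySem.List.pyRange 0 ((w.length : Nat) : Int) 1)
      = (List.range w.length).map (fun k : Nat => (k : Int)) := PySem.List.pyRange_zero_natCast _
  rw [h2, List.foldl_map]
  exact pvB2_outer_range w w.length le_rfl []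

-- ===== VERDICT (by name: the statement is the Claim_ definition above) =====
theorem calculate_mismatch_spec : Claim_equal_calculate_mismatch := by
  intro words _
  unfold Spec_calculate_mismatch
  rw [pvA_eq, pvB_eq]
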